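-- pv_equiv track=rewrite | github.com/gbcolborne/ner_eval | data_utils/data_utils.py | _get_mentions_bio2
-- ===== SOURCE A (Python) =====
-- def _get_mentions_bio2(sent, allow_prefix_errors, allow_type_errors):
--     """Extract entity mentions from sentence (BIO-2 encoding).
--
--     Input:
--
--     - sent: list of (line offset, token, label) tuples
--
--     - allow_prefix_errors: flag that indicates whether we allow an I
--       to follow an O. If True, we consider that this token if the
--       first token of a mention (note that we do not correct the
--       prefixes). If False, we raise an error and stop.
--
--     - allow_type_errors: flag that specifies whether we allow an I to
--       follow an I or B that has a different entity type. If False, we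
--       raise an error and stop. If True, we ignore the error. In this
--       case, we consider that that the prefix has precedence over the
--       entity type, and include the token in the same mention as the
--       previous token (note that we do not correct the entity types, so
--       they will not match); if we gave precedence to the entity type,
--       we could consider that the prefix is wrong and act as if it were
--       a B.
--
--     Output:
--
--     - list containing a (line offset, tokens, labels) tuple for each mention
--
--     """
--     mentions = []
--     mention_tokens = []
--     mention_labels = []
--     prev_prefix = "O"
--     prev_etype = None
--     # Add an O to the end of the sentence to catch sentence-ending mentions
--     padded_sent = sent[:]
--     padded_sent.append((padded_sent[-1][0]+1, None, "O"))
--     for (line, token, label) in padded_sent: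
--         # Split label into BIO prefix and entity type
--         prefix = label[0]
--         if prefix != "O":
--             etype = label[2:]
--         else:
--             etype = None
--
--         # Check for labeling inconsistencies. An I should follow a B or
--         # I of the same entity type.
--         if prefix == "I":
--             # Check previous prefix.
--             if prev_prefix == "O":
--                 if allow_prefix_errors:
--                     # Although this I prefix is inconsistent, we
--                     # ignore the error (see function documentation).
--                     pass
--                 else:
--                     msg = "ERROR at line {}: I found after an O".format(line)
--                     raise ValueError(msg)
--             # Check previous entity type.
--             if etype != prev_etype:
--                 if allow_type_errors:
--                     # Although this entity type is inconsistent, we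
--                     # ignore the error (see function documentation).
--                     pass
--                 else:
--                     msg = "ERROR at line {}: ".format(line)
--                     msg += "I-{} found after {}-{}".format(etype, prev_prefix, prev_etype)
--                     raise ValueError(msg)
--
--         # Check if a mention starts here. Note that if this is an I
--         # and it follows an O, we still consider that a mention starts
--         # here, unless allow_prefix_errors is False, in which case an
--         # error will already have been raised. See function
--         # documentation for more details.
--         mention_starts_here = False
--         if prefix == "B" or (prefix == "I" and prev_prefix == "O"):
--             mention_starts_here = True
--
--         # Check if the previous token was the last token of a
--         # mention. If so, output that mention, and initialize a new mention.
--         if prev_etype and (prefix=="O" or mention_starts_here):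
--             line_offset = line-len(mention_tokens)
--             mentions.append((line_offset, mention_tokens, mention_labels))
--             mention_tokens = []
--             mention_labels = []
--
--         # If token is part of a mention, append token and label to
--         # those of the current mention. Note that if the label entity
--         # type is not consistent with those of the other tokens in the
--         # mention, we ignore this error, unless allow_type_errors is
--         # False, in which case an error will already have been
--         # raised. See function documentation for more details.
--         if prefix != "O":
--             mention_tokens.append(token)
--             mention_labels.append(label)
--
--         # Prepare to move on to next token
--         prev_prefix = prefix
--         prev_etype = etype
--     return mentions
-- ===== SOURCE B (Python) =====
-- def _get_mentions_bio2(sent, allow_prefix_errors, allow_type_errors):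
--     """Extract entity mentions (BIO-2): parse, validate, segment, then assemble."""
--     padded = sent + [(sent[-1][0] + 1, None, "O")]
--     # Pass 1: parse every label into (line, token, label, prefix, etype)
--     parsed = []
--     for (line, token, label) in padded:
--         prefix = label[0]
--         etype = label[2:] if prefix != "O" else None
--         parsed.append((line, token, label, prefix, etype))
--     sentinel = (None, None, None, "O", None)
--     # Pass 2: validation over consecutive pairs (identical errors, same order)
--     for prev, cur in zip([sentinel] + parsed, parsed):
--         line, _, _, prefix, etype = cur
--         pprefix, petype = prev[3], prev[4]
--         if prefix == "I":
--             if pprefix == "O" and not allow_prefix_errors: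
--                 raise ValueError("ERROR at line {}: I found after an O".format(line))
--             if etype != petype and not allow_type_errors:
--                 raise ValueError("ERROR at line {}: I-{} found after {}-{}".format(
--                     line, etype, pprefix, petype))
--     # Pass 3: segmentation into raw spans (flush line kept, offset deferred)
--     spans = []
--     toks, labs = [], []
--     for prev, cur in zip([sentinel] + parsed, parsed):
--         line, token, label, prefix, _ = cur
--         pprefix, petype = prev[3], prev[4]
--         starts = prefix == "B" or (prefix == "I" and pprefix == "O")
--         if petype and (prefix == "O" or starts):
--             spans.append((line, toks, labs))
--             toks, labs = [], []
--         if prefix != "O":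
--             toks.append(token)
--             labs.append(label)
--     # Pass 4: assemble output tuples
--     return [(line - len(t), t, l) for (line, t, l) in spans]
-- ===== Notes on version B (the rewrite author's own statement) =====
-- stated objective: alternative
-- what changed: Replaces A's single interleaved state machine (carried prev_prefix/prev_etype, immediate offset arithmetic at each flush) with four separate passes: parse all labels once, validate consistency over zipped consecutive pairs, segment into raw spans over the same zipped pairs, and a final comprehension that computes each line offset from the span's flush line and token count.
import Mathlib
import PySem

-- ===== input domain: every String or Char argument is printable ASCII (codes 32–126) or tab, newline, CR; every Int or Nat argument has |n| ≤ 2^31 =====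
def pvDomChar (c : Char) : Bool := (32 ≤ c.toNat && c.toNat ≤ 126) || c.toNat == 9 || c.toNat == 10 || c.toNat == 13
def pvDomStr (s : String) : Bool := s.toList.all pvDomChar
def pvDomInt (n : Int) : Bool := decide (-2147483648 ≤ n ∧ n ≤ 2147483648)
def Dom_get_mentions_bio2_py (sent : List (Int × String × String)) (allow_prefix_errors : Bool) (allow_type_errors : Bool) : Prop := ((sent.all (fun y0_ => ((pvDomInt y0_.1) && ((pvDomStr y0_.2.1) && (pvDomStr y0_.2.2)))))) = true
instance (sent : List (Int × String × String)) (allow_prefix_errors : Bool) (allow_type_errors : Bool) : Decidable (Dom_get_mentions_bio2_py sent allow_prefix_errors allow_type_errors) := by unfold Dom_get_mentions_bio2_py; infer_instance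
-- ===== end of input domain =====

-- B replaces A's single interleaved state machine by four passes (parse, pairwise validate,
-- pairwise segment into raw spans, assemble offsets); alternative decomposition, same cost.
-- Inputs where Python A raises (empty sentence, empty label, disallowed I-inconsistency) are
-- excluded by Pre_; both Pythons raise the identical exceptions there.

-- ===== PORT A =====
-- Python truthiness of an optional string: None and "" are falsy.
def truthyOpt : Option String → Bool | some s => s != "" | none => false

-- A's raise statements fire only on inputs excluded by Pre_; the port ignores those branches.
-- Python truthiness of prev_etype: some s is truthy iff s ≠ "".
def loopA (l : List (Int × String × String))
    (mentions : List (Int × List String × List String))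
    (toks labs : List String) (pprefix : Char) (petype : Option String) :
    List (Int × List String × List String) :=
  match l with
  | [] => mentions
  | (line, token, label) :: rest =>
    -- pfx = label[0]; Pre_ guarantees label ≠ "" (Python raises IndexError otherwise)
    let pfx : Char := label.toList.headD '?'
    -- etype = label[2:] if pfx != "O" else None
    let etype : Option String := if pfx = 'O' then none else some (String.mk (label.toList.drop 2))
    let starts : Bool := pfx == 'B' || (pfx == 'I' && pprefix == 'O')
    let truthy : Bool := truthyOpt petype
    let st :=
      if truthy && (pfx == 'O' || starts) then
        (mentions ++ [((line - (toks.length : Int)), toks, labs)], ([] : List String), ([] : List String))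
      else (mentions, toks, labs)
    let st2 :=
      if pfx != 'O' then (st.2.1 ++ [token], st.2.2 ++ [label]) else (st.2.1, st.2.2)
    loopA rest st.1 st2.1 st2.2 pfx etype

def get_mentions_bio2_py (sent : List (Int × String × String)) (allow_prefix_errors : Bool) (allow_type_errors : Bool) : List (Int × List String × List String) :=
  -- padded_sent = sent[:] + [(sent[-1][0]+1, None, "O")]; sent = [] raises IndexError (outside Pre_)
  let padLine : Int := match sent.getLast? with | some t => t.1 + 1 | none => 0
  let padded := sent ++ [(padLine, "", "O")]
  loopA padded [] [] [] 'O' none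

-- ===== PORT B =====
-- Pass 1: parse each (line, token, label) into (line, token, label, pfx, etype).
def parseB (padded : List (Int × String × String)) : List (Int × String × String × Char × Option String) :=
  padded.map (fun t =>
    let pfx : Char := t.2.2.toList.headD '?'
    (t.1, t.2.1, t.2.2, pfx, if pfx = 'O' then none else some (String.mk (t.2.2.toList.drop 2))))

-- Pass 3 (pass 2, validation, only raises — those inputs are outside Pre_):
-- segmentation over zipped consecutive pairs, collecting raw spans (flush line, toks, labs).
def segB (pairs : List ((Int × String × String × Char × Option String) × (Int × String × String × Char × Option String)))
    (spans : List (Int × List String × List String)) (toks labs : List String) :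
    List (Int × List String × List String) :=
  match pairs with
  | [] => spans
  | (prev, cur) :: rest =>
    let pprefix := prev.2.2.2.1
    let petype := prev.2.2.2.2
    let line := cur.1
    let token := cur.2.1
    let label := cur.2.2.1
    let pfx := cur.2.2.2.1
    let starts : Bool := pfx == 'B' || (pfx == 'I' && pprefix == 'O')
    let truthy : Bool := truthyOpt petype
    let st :=
      if truthy && (pfx == 'O' || starts) then
        (spans ++ [(line, toks, labs)], ([] : List String), ([] : List String))
      else (spans, toks, labs)
    let st2 :=
      if pfx != 'O' then (st.2.1 ++ [token], st.2.2 ++ [label]) else (st.2.1, st.2.2)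
    segB rest st.1 st2.1 st2.2

def get_mentions_bio2_py_alt (sent : List (Int × String × String)) (allow_prefix_errors : Bool) (allow_type_errors : Bool) : List (Int × List String × List String) :=
  let padLine : Int := match sent.getLast? with | some t => t.1 + 1 | none => 0
  let padded := sent ++ [(padLine, "", "O")]
  let parsed := parseB padded
  let sentinel : Int × String × String × Char × Option String := (0, "", "", 'O', none)
  let spans := segB (List.zip (sentinel :: parsed) parsed) [] [] []
  -- Pass 4: assemble output tuples, offset = flush line - number of tokens
  spans.map (fun s => (s.1 - (s.2.1.length : Int), s.2.1, s.2.2))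

-- ===== PRECONDITION & SPEC =====
-- Pre_ excludes exactly the inputs where Python A raises: the empty sentence and any empty
-- label (IndexError), and any I-token whose predecessor (virtually "O" at the start) makes a
-- disallowed pfx or entity-type inconsistency (ValueError).
def Pre_get_mentions_bio2_py (sent : List (Int × String × String)) (allow_prefix_errors : Bool) (allow_type_errors : Bool) : Prop :=
  sent ≠ [] ∧
  (∀ t ∈ sent, t.2.2 ≠ "") ∧
  (∀ p ∈ List.zip (((0 : Int), "", "O") :: sent) sent,
    let pprefix : Char := p.1.2.2.toList.headD '?'
    let petype : Option String := if pprefix = 'O' then none else some (String.mk (p.1.2.2.toList.drop 2))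
    let pfx : Char := p.2.2.2.toList.headD '?'
    let etype : Option String := if pfx = 'O' then none else some (String.mk (p.2.2.2.toList.drop 2))
    pfx = 'I' →
      (allow_prefix_errors = true ∨ pprefix ≠ 'O') ∧
      (allow_type_errors = true ∨ etype = petype))
instance (sent : List (Int × String × String)) (allow_prefix_errors : Bool) (allow_type_errors : Bool) : Decidable (Pre_get_mentions_bio2_py sent allow_prefix_errors allow_type_errors) := by unfold Pre_get_mentions_bio2_py; infer_instance

def pvWitness_get_mentions_bio2_py : (List (Int × String × String)) × Bool × Bool :=
  ([(1, "John", "B-PER"), (2, "Smith", "I-PER"), (3, "runs", "O")], false, false)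

def Spec_get_mentions_bio2_py (sent : List (Int × String × String)) (allow_prefix_errors : Bool) (allow_type_errors : Bool) (out : List (Int × List String × List String)) : Prop := out = get_mentions_bio2_py_alt sent allow_prefix_errors allow_type_errors
instance (sent : List (Int × String × String)) (allow_prefix_errors : Bool) (allow_type_errors : Bool) (out : List (Int × List String × List String)) : Decidable (Spec_get_mentions_bio2_py sent allow_prefix_errors allow_type_errors out) := by unfold Spec_get_mentions_bio2_py; infer_instance

-- ===== CLAIM (what is proved, stated in full; the proofs are below) =====
def Claim_equal_get_mentions_bio2_py : Prop := ∀ (sent : List (Int × String × String)) (allow_prefix_errors : Bool) (allow_type_errors : Bool), Dom_get_mentions_bio2_py sent allow_prefix_errors allow_type_errors → Pre_get_mentions_bio2_py sent allow_prefix_errors allow_type_errors → Spec_get_mentions_bio2_py sent allow_prefix_errors allow_type_errors (get_mentions_bio2_py sent allow_prefix_errors allow_type_errors)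

-- ===== LEMMAS AND PROOFS =====

-- segB distributes over the spans accumulator
theorem segB_append (pairs : List ((Int × String × String × Char × Option String) × (Int × String × String × Char × Option String)))
    (S1 S2 : List (Int × List String × List String)) (toks labs : List String) :
    segB pairs (S1 ++ S2) toks labs = S1 ++ segB pairs S2 toks labs := by
  induction pairs generalizing S2 toks labs with
  | nil => simp [segB]
  | cons p rest ih =>
    obtain ⟨prev, cur⟩ := p
    by_cases h : (truthyOpt prev.2.2.2.2 &&
        (cur.2.2.2.1 == 'O' || (cur.2.2.2.1 == 'B' || (cur.2.2.2.1 == 'I' && prev.2.2.2.1 == 'O')))) = true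
    · simp only [segB, h, if_true, List.append_assoc]
      exact ih _ _ _
    · simp only [segB, h, if_false, Bool.false_eq_true]
      exact ih _ _ _

-- main invariant: A's loop over l with carried (pfx, etype) equals B's segmentation over
-- the pairs of (prev :: parseB l) with parseB l, followed by the offset-assembling map
theorem loopA_eq_segB (l : List (Int × String × String))
    (M : List (Int × List String × List String)) (toks labs : List String)
    (prev : Int × String × String × Char × Option String) :
    loopA l M toks labs prev.2.2.2.1 prev.2.2.2.2 =
      M ++ (segB (List.zip (prev :: parseB l) (parseB l)) [] toks labs).map
        (fun s => (s.1 - (s.2.1.length : Int), s.2.1, s.2.2)) := by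
  induction l generalizing M toks labs prev with
  | nil => simp [loopA, parseB, segB]
  | cons hd rest ih =>
    obtain ⟨line, token, label⟩ := hd
    have hcur : parseB ((line, token, label) :: rest) =
        (line, token, label, label.toList.headD '?',
          if label.toList.headD '?' = 'O' then none
          else some (String.mk (label.toList.drop 2))) :: parseB rest := by
      simp [parseB]
    rw [hcur]
    set cur : Int × String × String × Char × Option String :=
      (line, token, label, label.toList.headD '?',
        if label.toList.headD '?' = 'O' then none
        else some (String.mk (label.toList.drop 2))) with hcurdef
    simp only [List.zip_cons_cons, segB, loopA]
    by_cases h : (truthyOpt prev.2.2.2.2 &&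
        (label.toList.headD '?' == 'O' || (label.toList.headD '?' == 'B' ||
          (label.toList.headD '?' == 'I' && prev.2.2.2.1 == 'O')))) = true
    · have h' : (truthyOpt prev.2.2.2.2 &&
          (cur.2.2.2.1 == 'O' || (cur.2.2.2.1 == 'B' ||
            (cur.2.2.2.1 == 'I' && prev.2.2.2.1 == 'O')))) = true := h
      simp only [h, h', if_true]
      have := ih (M ++ [(line - (toks.length : Int), toks, labs)])
        (if (label.toList.headD '?' != 'O') = true then [token] else [])
        (if (label.toList.headD '?' != 'O') = true then [label] else []) cur
      simp only [hcurdef] at this ⊢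
      rw [show (List.nil ++ [(line, toks, labs)] :
            List (Int × List String × List String)) = [(line, toks, labs)] ++ [] from by simp,
          segB_append]
      simp only [List.map_append, List.map_cons, List.map_nil]
      split_ifs with ht <;> simp_all
    · have h' : (truthyOpt prev.2.2.2.2 &&
          (cur.2.2.2.1 == 'O' || (cur.2.2.2.1 == 'B' ||
            (cur.2.2.2.1 == 'I' && prev.2.2.2.1 == 'O')))) = false :=
        Bool.eq_false_iff.mpr (fun hc => h hc)
      simp only [h, h', if_false, Bool.false_eq_true]
      have := ih M
        (if (label.toList.headD '?' != 'O') = true then toks ++ [token] else toks)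
        (if (label.toList.headD '?' != 'O') = true then labs ++ [label] else labs) cur
      simp only [hcurdef] at this ⊢
      split_ifs with ht <;> simp_all

-- ===== VERDICT (by name: the statement is the Claim_ definition above) =====
theorem get_mentions_bio2_py_spec : Claim_equal_get_mentions_bio2_py := by
  intro sent ape ate _ _
  unfold Spec_get_mentions_bio2_py get_mentions_bio2_py get_mentions_bio2_py_alt
  exact loopA_eq_segB _ [] [] [] ((0 : Int), "", "", 'O', none)
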